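-- pv_equiv track=rewrite | github.com/arepavich/advent-of-code | src/day4.py | password_meets_criteria
-- ===== SOURCE A (Python) =====
-- def password_meets_criteria(password):
--     """Checks a password against the full criteria provided (including part 2).
--
--     Args:
--         password: An integer representing the password to check against the criteria.
--
--     Returns:
--         A boolean indicating whether the password meets the criteria.
--
--     Raises:
--         TypeError: The password provided is not of type `int`.
--     """
--
--     if not isinstance(password, int):
--         raise TypeError(f"Value for password is of invalid type. Requires an integer, but received {type(password)}.")
--
--     pw_string = str(password)
--     has_matching_adjacent = False
--     matched = None
--     prev_a = None
--     for a, b in zip(pw_string, pw_string[1:]):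
--         if int(b) < int(a):
--             return False
--
--         if a == b and matched is None:
--             has_matching_adjacent = True
--             matched = a
--
--         if prev_a is not None and prev_a == b and prev_a == matched:
--             has_matching_adjacent = False
--             matched = None
--
--         prev_a = a
--
--     return has_matching_adjacent
-- ===== SOURCE B (Python) =====
-- from itertools import groupby
--
--
-- def password_meets_criteria(password):
--     """Two declarative passes instead of A's stateful matched/prev_a scan."""
--     if not isinstance(password, int):
--         raise TypeError(f"Value for password is of invalid type. Requires an integer, but received {type(password)}.")
--
--     s = str(password)
--     digits = [int(d) for d in s]
--     if any(x > y for x, y in zip(digits, digits[1:])):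
--         return False
--     return any(len(list(g)) == 2 for _, g in groupby(s))
-- ===== Notes on version B (the rewrite author's own statement) =====
-- stated objective: simpler
-- what changed: Replaces A's single stateful scan with its matched/prev_a bookkeeping by two declarative passes: a zip-based non-decreasing check over the digit values, then itertools.groupby asking whether some run of equal digits has length exactly 2.
import Mathlib
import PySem

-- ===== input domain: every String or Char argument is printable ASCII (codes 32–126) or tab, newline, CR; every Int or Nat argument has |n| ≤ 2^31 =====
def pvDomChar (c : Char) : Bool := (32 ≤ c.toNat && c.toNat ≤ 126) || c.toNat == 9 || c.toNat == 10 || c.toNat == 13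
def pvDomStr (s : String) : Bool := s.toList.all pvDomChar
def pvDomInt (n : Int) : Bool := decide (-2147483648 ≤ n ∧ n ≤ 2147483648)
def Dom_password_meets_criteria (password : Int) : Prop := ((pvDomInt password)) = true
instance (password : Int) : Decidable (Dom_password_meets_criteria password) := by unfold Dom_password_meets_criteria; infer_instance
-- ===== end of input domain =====

-- B replaces A's single stateful scan (matched/prev_a bookkeeping) by two declarative passes:
-- a non-decreasing check on the digit values, then a groupby pass asking for a run of length exactly 2.


-- ===== PORT A =====
-- int(ch) for a one-character string; exact via PySem.Int.ofChars? (none = ValueError).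
-- The `.getD 0` default is unreachable on Pre_ (there every character is a decimal digit);
-- the inputs where Python raises ValueError (negative numbers) lie outside Pre_.
def pvCharInt (c : Char) : Int := (PySem.Int.ofChars? [c]).getD 0

-- the for-loop over zip(pw_string, pw_string[1:]) with its state (has_matching_adjacent, matched, prev_a)
def pmcLoop : List (Char × Char) → Bool → Option Char → Option Char → Bool
  | [], has, _, _ => has
  | (a, b) :: rest, has, matched, prevA =>
    if pvCharInt b < pvCharInt a then false
    else
      let doSet := a == b && matched == none
      let has1 := if doSet then true else has
      let matched1 := if doSet then some a else matched
      let doRst := prevA != none && prevA == some b && prevA == matched1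
      let has2 := if doRst then false else has1
      let matched2 := if doRst then none else matched1
      pmcLoop rest has2 matched2 (some a)

def password_meets_criteria (password : Int) : Bool :=
  let pwString := PySem.Int.toChars password
  pmcLoop (pwString.zip (PySem.List.slice pwString (some 1) none)) false none none

-- ===== PORT B =====
-- run lengths produced by itertools.groupby(s)
def pvRunLens : List Char → List Nat
  | [] => []
  | c :: rest => ((rest.takeWhile (· == c)).length + 1) :: pvRunLens (rest.dropWhile (· == c))
  termination_by l => l.length
  decreasing_by have := List.length_dropWhile_le (· == c) rest; simp only [List.length_cons]; omega

def password_meets_criteria_alt (password : Int) : Bool :=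
  let s := PySem.Int.toChars password
  let digits := s.map pvCharInt
  if (digits.zip (PySem.List.slice digits (some 1) none)).any (fun p => p.1 > p.2) then false
  else (pvRunLens s).any (fun n => n == 2)

-- ===== PRECONDITION & SPEC =====
-- Pre_ excludes exactly the inputs on which the Python A raises: negative passwords, where
-- int('-') raises ValueError (B raises there too).
def Pre_password_meets_criteria (password : Int) : Prop := 0 ≤ password
instance (password : Int) : Decidable (Pre_password_meets_criteria password) := by unfold Pre_password_meets_criteria; infer_instance
def pvWitness_password_meets_criteria : Int := 111122

def Spec_password_meets_criteria (password : Int) (out : Bool) : Prop := out = password_meets_criteria_alt password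
instance (password : Int) (out : Bool) : Decidable (Spec_password_meets_criteria password out) := by unfold Spec_password_meets_criteria; infer_instance

-- ===== CLAIM (what is proved, stated in full; the proofs are below) =====
def Claim_equal_password_meets_criteria : Prop := ∀ (password : Int), Dom_password_meets_criteria password → Pre_password_meets_criteria password → Spec_password_meets_criteria password (password_meets_criteria password)

-- ===== LEMMAS AND PROOFS =====

def pvIsDig (c : Char) : Prop := 48 ≤ c.toNat ∧ c.toNat ≤ 57

def pvRun2 (t : List Char) : Bool := (pvRunLens t).any (fun n => n == 2)

theorem pvRun2_cons (c : Char) (r : List Char) :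
    pvRun2 (c :: r) = ((((r.takeWhile (· == c)).length + 1) == 2) || pvRun2 (r.dropWhile (· == c))) := by
  rw [pvRun2, pvRunLens]
  simp [pvRun2]

theorem pvRun2_ne (x y : Char) (t : List Char) (h : ¬ (y = x)) :
    pvRun2 (x :: y :: t) = pvRun2 (y :: t) := by
  rw [pvRun2_cons, List.takeWhile_cons, List.dropWhile_cons]
  simp [h]

theorem pvRun2_eq2 (x : Char) (t : List Char) :
    pvRun2 (x :: x :: t) =
      (if t.takeWhile (· == x) = [] then true else pvRun2 (t.dropWhile (· == x))) := by
  rw [pvRun2_cons, List.takeWhile_cons, List.dropWhile_cons]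
  by_cases htw : t.takeWhile (· == x) = []
  · simp [htw]
  · simp [htw]

theorem pvChar_eq_of_toNat_eq {c d : Char} (h : c.toNat = d.toNat) : c = d := by
  have := Char.ofNat_toNat c
  rw [h, Char.ofNat_toNat] at this
  exact this.symm

theorem pvOfChars_digit {c : Char} (h : pvIsDig c) :
    PySem.Int.ofChars? [c] = some ((c.toNat : Int) - 48) := by
  obtain ⟨h1, h2⟩ := h
  have hv : c.toNat = 48 ∨ c.toNat = 49 ∨ c.toNat = 50 ∨ c.toNat = 51 ∨ c.toNat = 52 ∨
      c.toNat = 53 ∨ c.toNat = 54 ∨ c.toNat = 55 ∨ c.toNat = 56 ∨ c.toNat = 57 := by omega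
  rcases hv with h|h|h|h|h|h|h|h|h|h
  · have e : c = '0' := pvChar_eq_of_toNat_eq (by rw [h]; rfl); subst e; decide
  · have e : c = '1' := pvChar_eq_of_toNat_eq (by rw [h]; rfl); subst e; decide
  · have e : c = '2' := pvChar_eq_of_toNat_eq (by rw [h]; rfl); subst e; decide
  · have e : c = '3' := pvChar_eq_of_toNat_eq (by rw [h]; rfl); subst e; decide
  · have e : c = '4' := pvChar_eq_of_toNat_eq (by rw [h]; rfl); subst e; decide
  · have e : c = '5' := pvChar_eq_of_toNat_eq (by rw [h]; rfl); subst e; decide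
  · have e : c = '6' := pvChar_eq_of_toNat_eq (by rw [h]; rfl); subst e; decide
  · have e : c = '7' := pvChar_eq_of_toNat_eq (by rw [h]; rfl); subst e; decide
  · have e : c = '8' := pvChar_eq_of_toNat_eq (by rw [h]; rfl); subst e; decide
  · have e : c = '9' := pvChar_eq_of_toNat_eq (by rw [h]; rfl); subst e; decide

theorem pvCharInt_digit {c : Char} (h : pvIsDig c) : pvCharInt c = (c.toNat : Int) - 48 := by
  rw [pvCharInt, pvOfChars_digit h]; rfl

theorem pvChar_le_iff {a b : Char} : a ≤ b ↔ a.toNat ≤ b.toNat := by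
  rw [Char.le_def]
  exact UInt32.le_iff_toNat_le

theorem pvGate_false {a b : Char} (ha : pvIsDig a) (hb : pvIsDig b) (hab : a ≤ b) :
    ¬ (pvCharInt b < pvCharInt a) := by
  rw [pvCharInt_digit ha, pvCharInt_digit hb]
  have := pvChar_le_iff.mp hab
  omega

theorem pvLe_of_gate {a b : Char} (ha : pvIsDig a) (hb : pvIsDig b)
    (h : ¬ (pvCharInt b < pvCharInt a)) : a ≤ b := by
  rw [pvCharInt_digit ha, pvCharInt_digit hb] at h
  exact pvChar_le_iff.mpr (by omega)

theorem pvDigitChar_isDig {m : Nat} (h : m < 10) : pvIsDig m.digitChar := by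
  unfold pvIsDig; interval_cases m <;> refine ⟨by decide, by decide⟩

theorem pvToDigitsCore_isDig : ∀ (fuel n : Nat) (l : List Char), (∀ c ∈ l, pvIsDig c) →
    ∀ c ∈ Nat.toDigitsCore 10 fuel n l, pvIsDig c := by
  intro fuel
  induction fuel with
  | zero => intro n l hl c hc; exact hl c hc
  | succ f ih =>
    intro n l hl c hc
    have hd : pvIsDig ((n % 10).digitChar) := pvDigitChar_isDig (Nat.mod_lt _ (by norm_num))
    rw [Nat.toDigitsCore] at hc
    by_cases h : n / 10 = 0
    · rw [if_pos h] at hc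
      rcases List.mem_cons.mp hc with h' | h'
      · exact h' ▸ hd
      · exact hl c h'
    · rw [if_neg h] at hc
      refine ih _ _ ?_ c hc
      intro x hx
      rcases List.mem_cons.mp hx with h' | h'
      · exact h' ▸ hd
      · exact hl x h'

theorem pvToChars_isDig {n : Int} (h : 0 ≤ n) : ∀ c ∈ PySem.Int.toChars n, pvIsDig c := by
  intro c hc
  rw [PySem.Int.toChars, if_neg (by omega)] at hc
  rw [Nat.toDigits] at hc
  exact pvToDigitsCore_isDig _ _ [] (by simp) c hc

theorem pvIsChain_of_pairs : ∀ (s : List Char),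
    (∀ p ∈ s.zip s.tail, (p.1 : Char) ≤ p.2) → s.IsChain (· ≤ ·)
  | [], _ => List.isChain_nil
  | [_], _ => List.isChain_singleton _
  | a :: b :: t, h => by
    rw [List.isChain_cons_cons]
    refine ⟨h (a, b) (by simp), pvIsChain_of_pairs (b :: t) ?_⟩
    intro p hp
    exact h p (by simpa [List.zip_cons_cons] using List.mem_cons_of_mem _ hp)

theorem pvLoop_gate : ∀ (P : List (Char × Char)) (has : Bool) (m prevA : Option Char),
    (∃ p ∈ P, pvCharInt p.2 < pvCharInt p.1) → pmcLoop P has m prevA = false := by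
  intro P
  induction P with
  | nil => intro _ _ _ h; simp at h
  | cons q rest ih =>
    intro has m prevA h
    obtain ⟨a, b⟩ := q
    rw [pmcLoop]
    by_cases hg : pvCharInt b < pvCharInt a
    · rw [if_pos hg]
    · rw [if_neg hg]
      apply ih
      obtain ⟨p, hp, hlt⟩ := h
      rcases List.mem_cons.mp hp with rfl | h'
      · exact absurd hlt hg
      · exact ⟨p, h', hlt⟩

-- single-step reductions of A's loop body (gate known not to fire)

-- m = none, prev = x, pair (x, x): the set fires and the reset immediately undoes it
theorem pvStep_reset (x : Char) (r : List (Char × Char))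
    (hg : ¬ pvCharInt x < pvCharInt x) :
    pmcLoop ((x, x) :: r) false none (some x) = pmcLoop r false none (some x) := by
  rw [pmcLoop, if_neg hg]; simp

-- m = none, prev = p ≠ x, pair (x, x): a fresh run of x starts
theorem pvStep_fresh (x p : Char) (r : List (Char × Char)) (hpx : p ≠ x)
    (hg : ¬ pvCharInt x < pvCharInt x) :
    pmcLoop ((x, x) :: r) false none (some p) = pmcLoop r true (some x) (some x) := by
  rw [pmcLoop, if_neg hg]; simp [hpx]

-- m = none, pair (x, y) with x ≠ y: nothing fires
theorem pvStep_skip (x y p : Char) (r : List (Char × Char)) (hxy : x ≠ y)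
    (hg : ¬ pvCharInt y < pvCharInt x) :
    pmcLoop ((x, y) :: r) false none (some p) = pmcLoop r false none (some x) := by
  rw [pmcLoop, if_neg hg]
  by_cases hpy : p = y
  · simp [hxy, hpy]
  · simp [hxy]

-- m = some c with ¬(p = y ∧ p = c): the matched value survives the step
theorem pvStep_stuck (x y p c : Char) (r : List (Char × Char)) (h : ¬ (p = y ∧ p = c))
    (hg : ¬ pvCharInt y < pvCharInt x) :
    pmcLoop ((x, y) :: r) true (some c) (some p) = pmcLoop r true (some c) (some x) := by
  rw [pmcLoop, if_neg hg]
  by_cases hpy : p = y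
  · have hpc : p ≠ c := fun e => h ⟨hpy, e⟩
    have hyc : ¬ (y = c) := hpy ▸ hpc
    simp [hpy, hyc]
  · simp [hpy]

-- m = some c, prev = c, pair (c, c): the reset kills the run (it has length ≥ 3)
theorem pvStep_kill (c : Char) (r : List (Char × Char))
    (hg : ¬ pvCharInt c < pvCharInt c) :
    pmcLoop ((c, c) :: r) true (some c) (some c) = pmcLoop r false none (some c) := by
  rw [pmcLoop, if_neg hg]; simp

-- the very first pair, prev = none: the reset can never fire
theorem pvStep_start_eq (x : Char) (r : List (Char × Char))
    (hg : ¬ pvCharInt x < pvCharInt x) :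
    pmcLoop ((x, x) :: r) false none none = pmcLoop r true (some x) (some x) := by
  rw [pmcLoop, if_neg hg]; simp

theorem pvStep_start_ne (x y : Char) (r : List (Char × Char)) (hxy : x ≠ y)
    (hg : ¬ pvCharInt y < pvCharInt x) :
    pmcLoop ((x, y) :: r) false none none = pmcLoop r false none (some x) := by
  rw [pmcLoop, if_neg hg]; simp [hxy]

-- once `matched` holds a character that no longer occurs, the loop is a no-op returning true
theorem pvLoop_stuck : ∀ (t : List Char) (p c : Char),
    c ∉ t → (∀ x ∈ p :: t, pvIsDig x) → (p :: t).IsChain (· ≤ ·) →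
    pmcLoop (t.zip t.tail) true (some c) (some p) = true := by
  intro t
  induction t with
  | nil => intro p c _ _ _; rfl
  | cons x t' ih =>
    intro p c hcn hd hch
    cases t' with
    | nil => rfl
    | cons y t'' =>
      have hxy : x ≤ y := (List.isChain_cons_cons.mp (List.isChain_cons_cons.mp hch).2).1
      have hg : ¬ pvCharInt y < pvCharInt x :=
        pvGate_false (hd x (by simp)) (hd y (by simp)) hxy
      have hrst : ¬ (p = y ∧ p = c) := by
        rintro ⟨h1, h2⟩
        exact hcn (by simp [← h2, h1])
      rw [List.tail_cons, List.zip_cons_cons, pvStep_stuck x y p c _ hrst hg]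
      exact ih x c (fun h => hcn (List.mem_cons_of_mem _ h))
        (fun z hz => hd z (List.mem_cons_of_mem _ hz))
        (List.isChain_cons_cons.mp hch).2

-- in a sorted list, a strictly smaller previous character never reappears
theorem pvNotMem_of_lt {c y : Char} {v : List Char} (hcy : c ≠ y)
    (hch : (c :: y :: v).IsChain (· ≤ ·)) : c ∉ y :: v := by
  intro hmem
  have hle : c ≤ y := (List.isChain_cons_cons.mp hch).1
  have hlt : c < y := lt_of_le_of_ne hle hcy
  rcases List.mem_cons.mp hmem with h | h
  · exact hcy h
  · have : y ≤ c := (List.isChain_cons_cons.mp hch).2.rel_cons h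
    exact absurd (lt_of_lt_of_le hlt this) (lt_irrefl c)

-- the state after the first pair of a run of c: one more c-pair kills the run, anything else locks true
theorem pvLoop_live (N : Nat)
    (IH : ∀ (t : List Char) (p : Char), t.length ≤ N → (∀ x ∈ p :: t, pvIsDig x) →
      (p :: t).IsChain (· ≤ ·) →
      pmcLoop (t.zip t.tail) false none (some p) = pvRun2 (t.dropWhile (· == p)))
    (v : List Char) (c : Char) (hlen : v.length + 1 ≤ N)
    (hd : ∀ x ∈ c :: v, pvIsDig x) (hch : (c :: v).IsChain (· ≤ ·)) :
    pmcLoop ((c :: v).zip v) true (some c) (some c) =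
      (if v.takeWhile (· == c) = [] then true else pvRun2 (v.dropWhile (· == c))) := by
  cases v with
  | nil => rfl
  | cons y v' =>
    have hcy : c ≤ y := (List.isChain_cons_cons.mp hch).1
    have hg : ¬ pvCharInt y < pvCharInt c :=
      pvGate_false (hd c (by simp)) (hd y (by simp)) hcy
    rw [List.zip_cons_cons]
    by_cases h : y = c
    · subst h
      rw [pvStep_kill y _ hg]
      have hres := IH (y :: v') y (by simp only [List.length_cons] at hlen ⊢; omega) hd hch
      rw [List.tail_cons] at hres
      rw [hres, List.takeWhile_cons, List.dropWhile_cons]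
      simp
    · have hne : c ≠ y := fun e => h e.symm
      rw [pvStep_stuck c y c c _ (fun hh => hne hh.1) hg]
      have htw : (y :: v').takeWhile (· == c) = [] := by
        rw [List.takeWhile_cons]
        simp [h]
      rw [htw, if_pos rfl]
      exact pvLoop_stuck (y :: v') c c (pvNotMem_of_lt hne hch) hd hch

theorem pvLoop_none : ∀ (N : Nat) (t : List Char) (p : Char), t.length ≤ N →
    (∀ x ∈ p :: t, pvIsDig x) → (p :: t).IsChain (· ≤ ·) →
    pmcLoop (t.zip t.tail) false none (some p) = pvRun2 (t.dropWhile (· == p)) := by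
  intro N
  induction N with
  | zero =>
    intro t p hlen _ _
    have ht : t = [] := List.length_eq_zero_iff.mp (Nat.le_zero.mp hlen)
    subst ht
    simp [pmcLoop, pvRun2, pvRunLens]
  | succ N ih =>
    intro t p hlen hd hch
    cases t with
    | nil => simp [pmcLoop, pvRun2, pvRunLens]
    | cons x t1 =>
      cases t1 with
      | nil =>
        by_cases h : x = p <;>
          simp [pmcLoop, pvRun2, pvRunLens, h]
      | cons y t'' =>
        have hxy : x ≤ y := (List.isChain_cons_cons.mp (List.isChain_cons_cons.mp hch).2).1
        have hg : ¬ pvCharInt y < pvCharInt x :=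
          pvGate_false (hd x (by simp)) (hd y (by simp)) hxy
        have hdt : ∀ z ∈ x :: y :: t'', pvIsDig z := fun z hz => hd z (List.mem_cons_of_mem _ hz)
        have hcht : (x :: y :: t'').IsChain (· ≤ ·) := (List.isChain_cons_cons.mp hch).2
        rw [List.tail_cons, List.zip_cons_cons]
        by_cases hxyeq : x = y
        · subst hxyeq
          by_cases hpx : p = x
          · subst hpx
            rw [pvStep_reset p _ hg]
            have hres := ih (p :: t'') p (by simp only [List.length_cons] at hlen ⊢; omega)
              hdt hcht
            rw [List.tail_cons] at hres
            rw [hres]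
            simp
          · rw [pvStep_fresh x p _ hpx hg]
            rw [pvLoop_live N ih t'' x (by simp only [List.length_cons] at hlen ⊢; omega)
              (fun z hz => hdt z (List.mem_cons_of_mem _ hz))
              (List.isChain_cons_cons.mp hcht).2]
            have hrhs : List.dropWhile (· == p) (x :: x :: t'') = x :: x :: t'' := by
              rw [List.dropWhile_cons]
              simp [show ¬ x = p from fun e => hpx e.symm]
            rw [hrhs, pvRun2_eq2]
        · rw [pvStep_skip x y p _ hxyeq hg]
          have hres := ih (y :: t'') x (by simp only [List.length_cons] at hlen ⊢; omega)
            hdt hcht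
          rw [List.tail_cons] at hres
          rw [hres]
          have hyx : ¬ (y = x) := fun e => hxyeq e.symm
          have h1 : List.dropWhile (· == x) (y :: t'') = y :: t'' := by
            rw [List.dropWhile_cons]; simp [hyx]
          rw [h1]
          by_cases hpx : x = p
          · have h2 : List.dropWhile (· == p) (x :: y :: t'') = y :: t'' := by
              rw [List.dropWhile_cons, List.dropWhile_cons]
              simp [hpx, show ¬ y = p from fun e => hxyeq (hpx.trans e.symm)]
            rw [h2]
          · have h2 : List.dropWhile (· == p) (x :: y :: t'') = x :: y :: t'' := by
              rw [List.dropWhile_cons]; simp [show ¬ x = p from hpx]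
            rw [h2, pvRun2_ne x y t'' hyx]

-- A's whole loop on a digit-sorted string computes "some run has length exactly 2"
theorem pvLoop_run2 (s : List Char) (hd : ∀ x ∈ s, pvIsDig x) (hch : s.IsChain (· ≤ ·)) :
    pmcLoop (s.zip s.tail) false none none = pvRun2 s := by
  cases s with
  | nil => simp [pmcLoop, pvRun2, pvRunLens]
  | cons c t =>
    cases t with
    | nil => simp [pmcLoop, pvRun2, pvRunLens]
    | cons y t' =>
      have hcy : c ≤ y := (List.isChain_cons_cons.mp hch).1
      have hg1 : ¬ pvCharInt y < pvCharInt c :=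
        pvGate_false (hd c (by simp)) (hd y (by simp)) hcy
      rw [List.tail_cons, List.zip_cons_cons]
      by_cases hcyeq : c = y
      · subst hcyeq
        rw [pvStep_start_eq c _ hg1]
        rw [pvLoop_live (t'.length + 1) (fun t p hl => pvLoop_none (t'.length + 1) t p hl)
          t' c (by omega) (fun z hz => hd z (List.mem_cons_of_mem _ hz))
          (List.isChain_cons_cons.mp hch).2]
        rw [pvRun2_eq2]
      · rw [pvStep_start_ne c y _ hcyeq hg1]
        have hres := pvLoop_none (y :: t').length (y :: t') c (le_refl _) hd hch
        rw [List.tail_cons] at hres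
        rw [hres]
        have hyc : ¬ (y = c) := fun e => hcyeq e.symm
        have h1 : List.dropWhile (· == c) (y :: t') = y :: t' := by
          rw [List.dropWhile_cons]; simp [hyc]
        rw [h1, pvRun2_ne c y t' hyc]

-- ===== VERDICT (by name: the statement is the Claim_ definition above) =====
theorem password_meets_criteria_spec : Claim_equal_password_meets_criteria := by
  intro password _hdom hpre
  unfold Spec_password_meets_criteria
  rw [password_meets_criteria, password_meets_criteria_alt]
  simp only [PySem.List.slice_from_one]
  generalize hG : PySem.Int.toChars password = s
  have hd : ∀ c ∈ s, pvIsDig c := hG ▸ pvToChars_isDig hpre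
  have hzip : ((s.map pvCharInt).zip (s.map pvCharInt).tail).any (fun p => p.1 > p.2)
      = (s.zip s.tail).any (fun p => pvCharInt p.2 < pvCharInt p.1) := by
    rw [← List.map_tail, List.zip_map, List.any_map]
    rfl
  by_cases hg : ∃ p ∈ s.zip s.tail, pvCharInt p.2 < pvCharInt p.1
  · rw [pvLoop_gate _ _ _ _ hg, hzip]
    have hany : (s.zip s.tail).any (fun p => pvCharInt p.2 < pvCharInt p.1) = true := by
      rw [List.any_eq_true]
      obtain ⟨p, hp, h⟩ := hg
      exact ⟨p, hp, by simpa using h⟩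
    rw [if_pos hany]
  · have hgf : ∀ p ∈ s.zip s.tail, ¬ pvCharInt p.2 < pvCharInt p.1 := by
      intro p hp h
      exact hg ⟨p, hp, h⟩
    have hcond : ((s.map pvCharInt).zip (s.map pvCharInt).tail).any (fun p => p.1 > p.2) = false := by
      rw [hzip, List.any_eq_false]
      intro p hp
      simpa using hgf p hp
    rw [if_neg (by simp [hcond])]
    have hch : s.IsChain (· ≤ ·) := by
      apply pvIsChain_of_pairs
      intro p hp
      obtain ⟨h1, h2⟩ := List.of_mem_zip (a := p.1) (b := p.2) (by simpa using hp)
      exact pvLe_of_gate (hd _ h1) (hd _ (List.mem_of_mem_tail h2)) (hgf p hp)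
    exact pvLoop_run2 s hd hch
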